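-- pv_equiv track=rewrite | github.com/IAmJonoBo/Hotpass-Win64 | apps/data-platform/hotpass/imports/profiling.py | _classify_sheet
-- ===== SOURCE A (Python) =====
-- from typing import Any, Iterable
--
-- def _classify_sheet(columns: Iterable[str]) -> str:
--     lowered = [str(col).strip().lower() for col in columns]
--     meaningful = [name for name in lowered if name and not name.startswith("unnamed")]
--     if not meaningful:
--         return "reference"
--
--     contains = lambda keyword: any(keyword in name for name in meaningful)
--
--     if contains("email") and (contains("phone") or contains("cell") or contains("contact")):
--         return "contacts"
--     if contains("address") or contains("airport"):
--         return "addresses"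
--     if contains("note") or contains("issue") or contains("comments"):
--         return "notes"
--     transactional_hints = {"order", "invoice", "amount", "captured"}
--     if any(any(hint in name for hint in transactional_hints) for name in meaningful):
--         return "transactions"
--     reference_hints = {"category", "status", "priority", "lookup", "code"}
--     if len(meaningful) <= 4 and all(
--         any(hint in name for hint in reference_hints) for name in meaningful
--     ):
--         return "reference"
--     return "master"
-- ===== SOURCE B (Python) =====
-- def _classify_sheet(columns):
--     has_email = has_contactish = has_addr = has_note = has_txn = False
--     all_ref = True
--     count = 0
--     for col in columns:
--         name = str(col).strip().lower()
--         if not name or name.startswith("unnamed"):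
--             continue
--         count += 1
--         has_email = has_email or "email" in name
--         has_contactish = has_contactish or "phone" in name or "cell" in name or "contact" in name
--         has_addr = has_addr or "address" in name or "airport" in name
--         has_note = has_note or "note" in name or "issue" in name or "comments" in name
--         has_txn = has_txn or any(h in name for h in ("order", "invoice", "amount", "captured"))
--         all_ref = all_ref and any(h in name for h in ("category", "status", "priority", "lookup", "code"))
--     if count == 0:
--         return "reference"
--     if has_email and has_contactish:
--         return "contacts"
--     if has_addr:
--         return "addresses"
--     if has_note:
--         return "notes"
--     if has_txn:
--         return "transactions"
--     if count <= 4 and all_ref: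
--         return "reference"
--     return "master"
-- ===== Notes on version B (the rewrite author's own statement) =====
-- stated objective: alternative
-- what changed: B classifies in one streaming pass over the columns, accumulating boolean feature flags and a count instead of materialising the lowered/meaningful lists and rescanning them with a contains() closure for every keyword.
import Mathlib
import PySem

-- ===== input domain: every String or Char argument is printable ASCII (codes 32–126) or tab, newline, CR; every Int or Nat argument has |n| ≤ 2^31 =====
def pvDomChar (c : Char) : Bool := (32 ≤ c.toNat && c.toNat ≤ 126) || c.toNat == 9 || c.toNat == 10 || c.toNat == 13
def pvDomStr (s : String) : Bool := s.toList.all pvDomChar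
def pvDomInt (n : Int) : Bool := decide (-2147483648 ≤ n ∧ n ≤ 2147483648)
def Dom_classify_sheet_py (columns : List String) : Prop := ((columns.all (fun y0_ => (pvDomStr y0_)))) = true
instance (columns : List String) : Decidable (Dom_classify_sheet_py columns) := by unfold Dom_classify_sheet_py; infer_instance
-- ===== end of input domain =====

-- B replaces A's materialised lists and repeated contains() scans by one streaming pass
-- accumulating boolean flags and a count (objective: alternative decomposition, same cost class).

-- ===== PORT A =====
-- contains = lambda keyword: any(keyword in name for name in meaningful)
def pvContains (meaningful : List String) (kw : String) : Bool :=
  meaningful.any (fun name => PySem.Str.isIn kw name)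

def classify_sheet_py (columns : List String) : String :=
  let lowered := columns.map (fun col => PySem.Str.lower (PySem.Str.strip col))
  let meaningful := lowered.filter
    (fun name => !(name == "") && !(PySem.Str.startswith name "unnamed"))
  if meaningful.isEmpty then "reference"
  else if pvContains meaningful "email" &&
          (pvContains meaningful "phone" || pvContains meaningful "cell" ||
           pvContains meaningful "contact") then "contacts"
  else if pvContains meaningful "address" || pvContains meaningful "airport" then "addresses"
  else if pvContains meaningful "note" || pvContains meaningful "issue" ||
          pvContains meaningful "comments" then "notes"
  else if meaningful.any (fun name =>
          ["order", "invoice", "amount", "captured"].any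
            (fun hint => PySem.Str.isIn hint name)) then "transactions"
  else if decide (meaningful.length ≤ 4) &&
          meaningful.all (fun name =>
            ["category", "status", "priority", "lookup", "code"].any
              (fun hint => PySem.Str.isIn hint name)) then "reference"
  else "master"

-- ===== PORT B =====
-- loop body of B: update (has_email, has_contactish, has_addr, has_note, has_txn, all_ref, count)
def pvStep (st : Bool × Bool × Bool × Bool × Bool × Bool × Nat) (col : String) :
    Bool × Bool × Bool × Bool × Bool × Bool × Nat :=
  let name := PySem.Str.lower (PySem.Str.strip col)
  if name == "" || PySem.Str.startswith name "unnamed" then st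
  else
    match st with
    | (e, c, a, n, t, r, k) =>
      (e || PySem.Str.isIn "email" name,
       c || PySem.Str.isIn "phone" name || PySem.Str.isIn "cell" name ||
         PySem.Str.isIn "contact" name,
       a || PySem.Str.isIn "address" name || PySem.Str.isIn "airport" name,
       n || PySem.Str.isIn "note" name || PySem.Str.isIn "issue" name ||
         PySem.Str.isIn "comments" name,
       t || ["order", "invoice", "amount", "captured"].any
              (fun h => PySem.Str.isIn h name),
       r && ["category", "status", "priority", "lookup", "code"].any
              (fun h => PySem.Str.isIn h name),
       k + 1)

def classify_sheet_py_alt (columns : List String) : String :=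
  match columns.foldl pvStep (false, false, false, false, false, true, 0) with
  | (e, c, a, n, t, r, k) =>
    if k == 0 then "reference"
    else if e && c then "contacts"
    else if a then "addresses"
    else if n then "notes"
    else if t then "transactions"
    else if decide (k ≤ 4) && r then "reference"
    else "master"

-- ===== PRECONDITION & SPEC =====
def Spec_classify_sheet_py (columns : List String) (out : String) : Prop := out = classify_sheet_py_alt columns
instance (columns : List String) (out : String) : Decidable (Spec_classify_sheet_py columns out) := by unfold Spec_classify_sheet_py; infer_instance

-- ===== CLAIM (what is proved, stated in full; the proofs are below) =====
def Claim_equal_classify_sheet_py : Prop := ∀ (columns : List String), Dom_classify_sheet_py columns → Spec_classify_sheet_py columns (classify_sheet_py columns)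

-- ===== LEMMAS AND PROOFS =====

-- the "meaningful" list of A
def pvMean (columns : List String) : List String :=
  (columns.map (fun col => PySem.Str.lower (PySem.Str.strip col))).filter
    (fun name => !(name == "") && !(PySem.Str.startswith name "unnamed"))

-- A's body, re-stated through pvMean (definitional)
theorem pvA_eq (columns : List String) :
    classify_sheet_py columns =
      (if (pvMean columns).isEmpty then "reference"
       else if pvContains (pvMean columns) "email" &&
               (pvContains (pvMean columns) "phone" || pvContains (pvMean columns) "cell" ||
                pvContains (pvMean columns) "contact") then "contacts"
       else if pvContains (pvMean columns) "address" ||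
               pvContains (pvMean columns) "airport" then "addresses"
       else if pvContains (pvMean columns) "note" || pvContains (pvMean columns) "issue" ||
               pvContains (pvMean columns) "comments" then "notes"
       else if (pvMean columns).any (fun name =>
               ["order", "invoice", "amount", "captured"].any
                 (fun hint => PySem.Str.isIn hint name)) then "transactions"
       else if decide ((pvMean columns).length ≤ 4) &&
               (pvMean columns).all (fun name =>
                 ["category", "status", "priority", "lookup", "code"].any
                   (fun hint => PySem.Str.isIn hint name)) then "reference"
       else "master") := rfl

theorem pv_any_or {α : Type} (l : List α) (p q : α → Bool) :
    l.any (fun x => p x || q x) = (l.any p || l.any q) := by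
  induction l with
  | nil => simp
  | cons h t ih =>
    simp only [List.any_cons, ih]
    cases p h <;> cases q h <;> cases t.any p <;> cases t.any q <;> rfl

theorem pv_fold_eq (cs : List String) (e c a n t r : Bool) (k : Nat) :
    cs.foldl pvStep (e, c, a, n, t, r, k) =
      (e || (pvMean cs).any (fun s => PySem.Str.isIn "email" s),
       c || (pvMean cs).any (fun s => PySem.Str.isIn "phone" s ||
              PySem.Str.isIn "cell" s || PySem.Str.isIn "contact" s),
       a || (pvMean cs).any (fun s => PySem.Str.isIn "address" s ||
              PySem.Str.isIn "airport" s),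
       n || (pvMean cs).any (fun s => PySem.Str.isIn "note" s ||
              PySem.Str.isIn "issue" s || PySem.Str.isIn "comments" s),
       t || (pvMean cs).any (fun s =>
              ["order", "invoice", "amount", "captured"].any
                (fun h => PySem.Str.isIn h s)),
       r && (pvMean cs).all (fun s =>
              ["category", "status", "priority", "lookup", "code"].any
                (fun h => PySem.Str.isIn h s)),
       k + (pvMean cs).length) := by
  induction cs generalizing e c a n t r k with
  | nil => simp [pvMean]
  | cons h tl ih =>
    simp only [List.foldl_cons]
    cases hb1 : (PySem.Str.lower (PySem.Str.strip h) == "") <;>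
    cases hb2 : PySem.Str.startswith (PySem.Str.lower (PySem.Str.strip h)) "unnamed"
    case false.false =>
      have hm : pvMean (h :: tl) = PySem.Str.lower (PySem.Str.strip h) :: pvMean tl := by
        simp only [pvMean, List.map_cons, List.filter_cons, hb1, hb2, Bool.not_false,
          Bool.and_self, if_true]
      have hstep : pvStep (e, c, a, n, t, r, k) h =
          (e || PySem.Str.isIn "email" (PySem.Str.lower (PySem.Str.strip h)),
           c || PySem.Str.isIn "phone" (PySem.Str.lower (PySem.Str.strip h)) ||
             PySem.Str.isIn "cell" (PySem.Str.lower (PySem.Str.strip h)) ||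
             PySem.Str.isIn "contact" (PySem.Str.lower (PySem.Str.strip h)),
           a || PySem.Str.isIn "address" (PySem.Str.lower (PySem.Str.strip h)) ||
             PySem.Str.isIn "airport" (PySem.Str.lower (PySem.Str.strip h)),
           n || PySem.Str.isIn "note" (PySem.Str.lower (PySem.Str.strip h)) ||
             PySem.Str.isIn "issue" (PySem.Str.lower (PySem.Str.strip h)) ||
             PySem.Str.isIn "comments" (PySem.Str.lower (PySem.Str.strip h)),
           t || ["order", "invoice", "amount", "captured"].any
                  (fun hh => PySem.Str.isIn hh (PySem.Str.lower (PySem.Str.strip h))),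
           r && ["category", "status", "priority", "lookup", "code"].any
                  (fun hh => PySem.Str.isIn hh (PySem.Str.lower (PySem.Str.strip h))),
           k + 1) := by
        simp only [pvStep, hb1, hb2, Bool.or_self]; rfl
      rw [hstep, ih, hm]
      simp only [List.any_cons, List.all_cons, List.length_cons, Prod.mk.injEq]
      refine ⟨?_, ?_, ?_, ?_, ?_, ?_, ?_⟩
      all_goals first
        | omega
        | simp only [Bool.or_assoc]
        | simp only [Bool.and_assoc]
    all_goals
      have hm : pvMean (h :: tl) = pvMean tl := by
        simp only [pvMean, List.map_cons, List.filter_cons, hb1, hb2, Bool.not_false,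
          Bool.not_true, Bool.false_and, Bool.and_false]; rfl
      have hstep : pvStep (e, c, a, n, t, r, k) h = (e, c, a, n, t, r, k) := by
        simp only [pvStep, hb1, hb2, Bool.true_or, Bool.or_true]; rfl
      rw [hstep, ih, hm]

theorem pv_len_eq_zero (l : List String) : (l.length == 0) = l.isEmpty := by
  cases l <;> rfl

-- ===== VERDICT (by name: the statement is the Claim_ definition above) =====
theorem classify_sheet_py_spec : Claim_equal_classify_sheet_py := by
  intro columns _
  unfold Spec_classify_sheet_py classify_sheet_py_alt
  rw [pv_fold_eq]
  simp only [Bool.false_or, Bool.true_and, Nat.zero_add]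
  rw [pvA_eq, pv_len_eq_zero]
  simp only [pvContains, pv_any_or]
  rfl
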